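-- pv_equiv track=rewrite | github.com/Vandor13/adventOfCode2020 | d21_allergens.py | determine_common_element
-- ===== SOURCE A (Python) =====
-- def determine_common_element(sets) -> str:
--     if len(sets) < 1:
--         return None
--     merged_set = sets[0]
--     for i in range(1, len(sets)):
--         merged_set = merged_set & sets[i]
--     if len(merged_set) == 1:
--         return merged_set.pop()
--     else:
--         return None
-- ===== SOURCE B (Python) =====
-- def determine_common_element(sets) -> str:
--     if len(sets) < 1:
--         return None
--     tally = {}
--     for s in sets:
--         for x in s:
--             tally[x] = tally.get(x, 0) + 1
--     common = [x for x, c in tally.items() if c == len(sets)]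
--     if len(common) == 1:
--         return common[0]
--     return None
-- ===== Notes on version B (the rewrite author's own statement) =====
-- stated objective: alternative
-- what changed: Replaces the iterated pairwise set-intersection fold with a single counting pass over all sets into one dict, then selects the elements whose tally equals len(sets).
import Mathlib
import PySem

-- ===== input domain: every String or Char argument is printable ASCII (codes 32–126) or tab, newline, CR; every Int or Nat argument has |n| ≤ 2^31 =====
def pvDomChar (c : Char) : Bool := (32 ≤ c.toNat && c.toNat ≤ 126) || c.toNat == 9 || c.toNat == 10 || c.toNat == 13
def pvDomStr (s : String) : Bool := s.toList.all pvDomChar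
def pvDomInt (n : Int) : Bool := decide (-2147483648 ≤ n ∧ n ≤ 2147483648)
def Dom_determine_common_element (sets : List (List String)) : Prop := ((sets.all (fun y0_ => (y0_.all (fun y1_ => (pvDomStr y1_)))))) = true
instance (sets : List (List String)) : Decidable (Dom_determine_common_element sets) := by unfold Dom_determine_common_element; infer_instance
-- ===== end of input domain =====

-- B replaces A's fold of pairwise set intersections by one counting pass over all sets
-- plus a selection of the elements counted len(sets) times (alternative algorithm, same cost).


-- ===== PORT A =====
-- merged_set = sets[0]; for i in range(1,len): merged_set = merged_set & sets[i]
def determine_common_element (sets : List (List String)) : Option String :=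
  if sets.length < 1 then none
  else
    let merged :=
      (sets.drop 1).foldl (fun m s => PySem.Set.inter m (PySem.Set.ofList s))
        (PySem.Set.ofList (sets.headD []))
    if PySem.Set.len merged == 1 then merged.head? else none

-- ===== PORT B =====
-- tally = {}; for s in sets: for x in s: tally[x] = tally.get(x, 0) + 1
def determine_common_element_alt (sets : List (List String)) : Option String :=
  if sets.length < 1 then none
  else
    let tally :=
      sets.foldl
        (fun d s => (PySem.Set.ofList s).foldl (fun d x => d.insert x (d.getD x 0 + 1)) d)
        (PySem.Dict.empty : PySem.Dict String Int)
    let common := (tally.items.filter (fun kv => kv.2 == (sets.length : Int))).map Prod.fst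
    if common.length == 1 then common.head? else none

-- ===== PRECONDITION & SPEC =====
def Spec_determine_common_element (sets : List (List String)) (out : Option String) : Prop := out = determine_common_element_alt sets
instance (sets : List (List String)) (out : Option String) : Decidable (Spec_determine_common_element sets out) := by unfold Spec_determine_common_element; infer_instance

-- ===== CLAIM (what is proved, stated in full; the proofs are below) =====
def Claim_equal_determine_common_element : Prop := ∀ (sets : List (List String)), Dom_determine_common_element sets → Spec_determine_common_element sets (determine_common_element sets)

-- ===== LEMMAS AND PROOFS =====

-- A's fold: membership
theorem mergedA_mem (rest : List (List String)) (m : List String) (x : String) :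
    x ∈ rest.foldl (fun m s => PySem.Set.inter m (PySem.Set.ofList s)) m ↔
      x ∈ m ∧ ∀ s ∈ rest, x ∈ s := by
  induction rest generalizing m with
  | nil => simp
  | cons s ss ih =>
      simp only [List.foldl_cons, ih, PySem.Set.mem_inter, PySem.Set.mem_ofList,
        List.mem_cons]
      constructor
      · rintro ⟨⟨hm, hs⟩, hall⟩
        exact ⟨hm, by rintro t (rfl | ht); exact hs; exact hall t ht⟩
      · rintro ⟨hm, hall⟩
        exact ⟨⟨hm, hall s (Or.inl rfl)⟩, fun t ht => hall t (Or.inr ht)⟩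

-- A's fold: distinct
theorem mergedA_nodup (rest : List (List String)) (m : List String) (hm : m.Nodup) :
    (rest.foldl (fun m s => PySem.Set.inter m (PySem.Set.ofList s)) m).Nodup := by
  induction rest generalizing m with
  | nil => exact hm
  | cons s ss ih => exact ih _ (PySem.Set.nodup_inter _ _ hm)

-- B's nested fold is the counter of the concatenation of the deduped sets
theorem tallyB_eq (sets : List (List String)) (d : PySem.Dict String Int) :
    sets.foldl
        (fun d s => (PySem.Set.ofList s).foldl (fun d x => d.insert x (d.getD x 0 + 1)) d) d =
      (sets.flatMap (fun s => PySem.Set.ofList s)).foldl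
        (fun d x => d.insert x (d.getD x 0 + 1)) d := by
  induction sets generalizing d with
  | nil => rfl
  | cons s ss ih => simp [List.foldl_append, ih]

-- count of x in a deduped set
theorem count_ofList (s : List String) (x : String) :
    (PySem.Set.ofList s).count x = if x ∈ s then 1 else 0 := by
  by_cases h : x ∈ s
  · simp only [h, if_true]
    have hmem : x ∈ PySem.Set.ofList s := (PySem.Set.mem_ofList _ _).2 h
    have hle := List.nodup_iff_count_le_one.1 (PySem.Set.nodup_ofList s) x
    have hpos := List.count_pos_iff.2 hmem
    omega
  · simp only [h, if_false]
    exact List.count_eq_zero.2 (fun hc => h ((PySem.Set.mem_ofList _ _).1 hc))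

-- the total count is len(sets) iff x lies in every set (and it never exceeds it)
theorem count_flatMap (sets : List (List String)) (x : String) :
    (sets.flatMap (fun s => PySem.Set.ofList s)).count x ≤ sets.length ∧
      ((sets.flatMap (fun s => PySem.Set.ofList s)).count x = sets.length ↔
        ∀ s ∈ sets, x ∈ s) := by
  induction sets with
  | nil => simp
  | cons s ss ih =>
      simp only [List.flatMap_cons, List.count_append, count_ofList, List.length_cons,
        List.mem_cons]
      obtain ⟨ihle, ihiff⟩ := ih
      by_cases h : x ∈ s
      · simp only [h, if_true]
        refine ⟨by omega, ?_⟩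
        constructor
        · intro hc t ht
          rcases ht with rfl | ht
          · exact h
          · exact (ihiff.1 (by omega)) t ht
        · intro hall
          have := ihiff.2 (fun t ht => hall t (Or.inr ht))
          omega
      · simp only [h, if_false]
        refine ⟨by omega, ?_⟩
        constructor
        · intro hc; omega
        · intro hall; exact absurd (hall s (Or.inl rfl)) h

-- B's candidate list, rewritten as a filter of the deduped concatenation
theorem commonB_eq (sets : List (List String)) :
    ((((sets.flatMap (fun s => PySem.Set.ofList s)).foldl
        (fun d x => d.insert x (d.getD x 0 + 1))
        (PySem.Dict.empty : PySem.Dict String Int)).items.filter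
          (fun kv => kv.2 == (sets.length : Int))).map Prod.fst) =
      (PySem.Set.ofList (sets.flatMap (fun s => PySem.Set.ofList s))).filter
        (fun k => ((sets.flatMap (fun s => PySem.Set.ofList s)).count k : Int) == (sets.length : Int)) := by
  rw [PySem.Dict.foldl_insert_getD_add_one_eq_counter, PySem.Dict.items_counter]
  rw [List.filter_map, List.map_map]
  simp only [Function.comp_def]
  simp

-- the two candidate lists are permutations of each other (nonempty input)
theorem candidates_perm (s0 : List String) (rest : List (List String)) :
    (rest.foldl (fun m s => PySem.Set.inter m (PySem.Set.ofList s))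
        (PySem.Set.ofList s0)).Perm
      ((PySem.Set.ofList ((s0 :: rest).flatMap (fun s => PySem.Set.ofList s))).filter
        (fun k => (((s0 :: rest).flatMap (fun s => PySem.Set.ofList s)).count k : Int) ==
          ((s0 :: rest).length : Int))) := by
  rw [List.perm_ext_iff_of_nodup
      (mergedA_nodup _ _ (PySem.Set.nodup_ofList s0))
      ((PySem.Set.nodup_ofList _).filter _)]
  intro x
  obtain ⟨hle, hiff⟩ := count_flatMap (s0 :: rest) x
  simp only [mergedA_mem, List.mem_filter, PySem.Set.mem_ofList, List.mem_flatMap,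
    beq_iff_eq, Nat.cast_inj]
  constructor
  · rintro ⟨h0, hall⟩
    have hx : ∀ s ∈ s0 :: rest, x ∈ s := by
      intro t ht
      rcases List.mem_cons.1 ht with rfl | ht'
      · exact h0
      · exact hall t ht'
    exact ⟨⟨s0, List.mem_cons_self .., h0⟩, hiff.2 hx⟩
  · rintro ⟨-, hc⟩
    have hall := hiff.1 hc
    exact ⟨hall s0 (List.mem_cons_self ..), fun t ht => hall t (List.mem_cons_of_mem _ ht)⟩

-- ===== VERDICT (by name: the statement is the Claim_ definition above) =====
theorem determine_common_element_spec : Claim_equal_determine_common_element := by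
  intro sets _
  unfold Spec_determine_common_element determine_common_element determine_common_element_alt
  match sets with
  | [] => rfl
  | s0 :: rest =>
      simp only [List.drop_succ_cons, List.drop_zero, List.headD_cons]
      have hif : ¬ ((s0 :: rest).length < 1) := by simp
      rw [if_neg hif, if_neg hif]
      rw [tallyB_eq, commonB_eq]
      have hperm := candidates_perm s0 rest
      have hlen := hperm.length_eq
      by_cases h1 : (rest.foldl (fun m s => PySem.Set.inter m (PySem.Set.ofList s))
          (PySem.Set.ofList s0)).length = 1
      · obtain ⟨a, ha⟩ := List.length_eq_one_iff.1 h1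
        rw [ha] at hperm
        have hb := List.singleton_perm.1 hperm
        simp [PySem.Set.len, ha, hb]
      · have h2 : ((PySem.Set.ofList ((s0 :: rest).flatMap (fun s => PySem.Set.ofList s))).filter
            (fun k => (((s0 :: rest).flatMap (fun s => PySem.Set.ofList s)).count k : Int) ==
              ((s0 :: rest).length : Int))).length ≠ 1 := by omega
        simp only [PySem.Set.len]
        rw [if_neg (by simpa using h1), if_neg (by simpa using h2)]
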